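-- pv_equiv track=rewrite | github.com/dmitrifedorov/cowobench | src/graph.py | get_turn_cmd
-- ===== SOURCE A (Python) =====
-- def get_turn_cmd(distance: int) -> str:
--     if distance == 3:
--         yield 'SSS'
--     elif distance == 2:
--         for cmd in ['DSS', 'SDS', 'SSD']:
--             yield cmd
--     elif distance == 1:
--         for cmd in ['SDD', 'DSD', 'DDS']:
--             yield cmd
--     elif distance == 0:
--         yield 'DDD'
-- ===== SOURCE B (Python) =====
-- def get_turn_cmd(distance: int) -> str:
--     # The commands for distance d (0..3) are the 3-char strings over {S, D}
--     # containing exactly d 'S's, with the minority character sweeping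
--     # positions 0,1,2; build them arithmetically instead of listing them.
--     if 0 <= distance <= 3:
--         maj, mino = ('S', 'D') if distance >= 2 else ('D', 'S')
--         k = 3 - distance if distance >= 2 else distance
--         if k == 0:
--             yield maj * 3
--         else:
--             for i in range(3):
--                 yield maj * i + mino + maj * (2 - i)
-- ===== Notes on version B (the rewrite author's own statement) =====
-- stated objective: alternative
-- what changed: Instead of an if/elif cascade over hard-coded string lists, B constructs each command string arithmetically: for 0<=d<=3 the commands are the 3-char strings over {S,D} with exactly d S's, generated by sweeping the minority character across positions 0..2.
import Mathlib
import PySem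

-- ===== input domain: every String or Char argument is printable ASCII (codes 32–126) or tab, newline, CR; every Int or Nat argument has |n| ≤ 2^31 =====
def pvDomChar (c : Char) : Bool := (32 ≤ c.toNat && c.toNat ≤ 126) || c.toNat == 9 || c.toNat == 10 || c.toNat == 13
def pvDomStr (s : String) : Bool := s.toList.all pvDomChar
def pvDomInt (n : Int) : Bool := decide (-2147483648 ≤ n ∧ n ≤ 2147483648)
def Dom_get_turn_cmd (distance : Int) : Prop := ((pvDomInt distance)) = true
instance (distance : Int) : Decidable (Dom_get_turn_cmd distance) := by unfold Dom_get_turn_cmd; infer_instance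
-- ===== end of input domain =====

-- B builds the command strings arithmetically (minority-character sweep) instead of A's if/elif over literal lists; return-value equivalence (both are generators in Python).


-- ===== PORT A =====
def get_turn_cmd (distance : Int) : List String :=
  if distance = 3 then ["SSS"]
  else if distance = 2 then ["DSS", "SDS", "SSD"]
  else if distance = 1 then ["SDD", "DSD", "DDS"]
  else if distance = 0 then ["DDD"]
  else []

-- ===== PORT B =====
def get_turn_cmd_alt (distance : Int) : List String :=
  if 0 ≤ distance ∧ distance ≤ 3 then
    let mm : Char × Char := if 2 ≤ distance then ('S', 'D') else ('D', 'S')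
    let k : Int := if 2 ≤ distance then 3 - distance else distance
    if k = 0 then [String.ofList (List.replicate 3 mm.1)]
    else (List.range 3).map (fun i =>
      String.ofList (List.replicate i mm.1 ++ [mm.2] ++ List.replicate (2 - i) mm.1))
  else []

-- ===== PRECONDITION & SPEC =====
def Spec_get_turn_cmd (distance : Int) (out : List String) : Prop := out = get_turn_cmd_alt distance
instance (distance : Int) (out : List String) : Decidable (Spec_get_turn_cmd distance out) := by unfold Spec_get_turn_cmd; infer_instance

-- ===== CLAIM (what is proved, stated in full; the proofs are below) =====
def Claim_equal_get_turn_cmd : Prop := ∀ (distance : Int), Dom_get_turn_cmd distance → Spec_get_turn_cmd distance (get_turn_cmd distance)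

-- ===== LEMMAS AND PROOFS =====

-- ===== VERDICT (by name: the statement is the Claim_ definition above) =====
theorem get_turn_cmd_spec : Claim_equal_get_turn_cmd := by
  intro distance _
  unfold Spec_get_turn_cmd
  by_cases h3 : distance = 3
  · subst h3; decide
  by_cases h2 : distance = 2
  · subst h2; decide
  by_cases h1 : distance = 1
  · subst h1; decide
  by_cases h0 : distance = 0
  · subst h0; decide
  unfold get_turn_cmd get_turn_cmd_alt
  rw [if_neg h3, if_neg h2, if_neg h1, if_neg h0, if_neg (by omega)]
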